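-- pv_equiv track=rewrite | github.com/ankushtanwar-amroar/Amroar_CRM_replace | backend/modules/global_search/services/search_ranking.py | get_highlight_positions
-- ===== SOURCE A (Python) =====
-- from typing import Dict, List, Any, Tuple
--
-- def get_highlight_positions(query: str, text: str) -> List[Tuple[int, int]]:
--     """
--     Get positions of query matches in text for highlighting.
--
--     Returns: List of (start, end) positions
--     """
--     if not query or not text:
--         return []
--
--     positions = []
--     query_lower = query.lower()
--     text_lower = text.lower()
--
--     # Find all occurrences
--     start = 0
--     while True:
--         pos = text_lower.find(query_lower, start)
--         if pos == -1:
--             break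
--         positions.append((pos, pos + len(query)))
--         start = pos + 1
--
--     # Also find token matches
--     for token in query.lower().split():
--         start = 0
--         while True:
--             pos = text_lower.find(token, start)
--             if pos == -1:
--                 break
--             positions.append((pos, pos + len(token)))
--             start = pos + 1
--
--     # Merge overlapping positions
--     if positions:
--         positions.sort()
--         merged = [positions[0]]
--         for start, end in positions[1:]:
--             if start <= merged[-1][1]:
--                 merged[-1] = (merged[-1][0], max(merged[-1][1], end))
--             else:
--                 merged.append((start, end))
--         return merged
--
--     return positions
-- ===== SOURCE B (Python) =====
-- from typing import List, Tuple
--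
-- def get_highlight_positions(query: str, text: str) -> List[Tuple[int, int]]:
--     """Coverage-mask re-implementation: mark matched cells, then emit maximal runs.
--
--     Same find-loop matching as the original, but no interval list, no sort,
--     no merge pass: a boolean mask of len(text) cells is painted and scanned once.
--     """
--     if not query or not text:
--         return []
--
--     text_lower = text.lower()
--     query_lower = query.lower()
--     mask = [False] * len(text)
--
--     for pat in [query_lower] + query_lower.split():
--         start = 0
--         while True:
--             pos = text_lower.find(pat, start)
--             if pos == -1:
--                 break
--             for i in range(pos, pos + len(pat)):
--                 mask[i] = True
--             start = pos + 1
--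
--     result = []
--     run_start = None
--     for i, covered in enumerate(mask):
--         if covered and run_start is None:
--             run_start = i
--         elif not covered and run_start is not None:
--             result.append((run_start, i))
--             run_start = None
--     if run_start is not None:
--         result.append((run_start, len(text)))
--     return result
-- ===== Notes on version B (the rewrite author's own statement) =====
-- stated objective: alternative
-- what changed: Instead of collecting (start,end) intervals, sorting them and merging overlapping/touching ones, B paints a boolean coverage mask of len(text) cells with the same find-loop matches and emits the maximal True-runs in one left-to-right scan, so the sort and the merge pass disappear.
import Mathlib
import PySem

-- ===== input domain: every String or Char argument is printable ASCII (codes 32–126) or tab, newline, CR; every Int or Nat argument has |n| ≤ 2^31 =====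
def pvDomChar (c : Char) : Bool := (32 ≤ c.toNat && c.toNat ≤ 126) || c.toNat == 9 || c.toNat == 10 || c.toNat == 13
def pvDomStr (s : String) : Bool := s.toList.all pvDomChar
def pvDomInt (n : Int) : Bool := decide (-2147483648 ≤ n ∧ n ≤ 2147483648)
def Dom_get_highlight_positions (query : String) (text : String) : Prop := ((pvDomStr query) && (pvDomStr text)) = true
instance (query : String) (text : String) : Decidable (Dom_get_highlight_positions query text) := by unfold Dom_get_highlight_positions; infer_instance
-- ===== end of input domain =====

-- B replaces A's interval list + sort + merge pass by a boolean coverage mask painted by the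
-- same find loops and scanned once for maximal runs (objective: alternative; no sort, no merge).

-- ===== PORT A =====
-- while True: pos = text_lower.find(pat, start); positions.append((pos, pos+plen)); start = pos+1
-- (fuel-bounded structural recursion; fuel = len(text)+2 exceeds what the loop can iterate)
def pvFindAll : Nat → List Char → List Char → Int → Int → List (Int × Int)
  | 0, _, _, _, _ => []
  | Nat.succ f, tl, pat, start, plen =>
    let pos := PySem.Chars.findFrom tl pat start none
    if pos = -1 then []
    else (pos, pos + plen) :: pvFindAll f tl pat (pos + 1) plen

-- positions list: full-query matches, then one find loop per token of query.lower().split()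
def pvPositions (fuel : Nat) (tl ql : List Char) (qlen : Int) : List (Int × Int) :=
  (PySem.Chars.split₀ ql).foldl
    (fun acc tok => acc ++ pvFindAll fuel tl tok 0 (tok.length : Int))
    (pvFindAll fuel tl ql 0 qlen)

-- merged[-1] is mutated in place: the accumulator is kept in reverse order, reversed at the end
def pvMergeStep (acc : List (Int × Int)) (p : Int × Int) : List (Int × Int) :=
  match acc with
  | [] => [p]
  | (ms, me) :: rest => if p.1 ≤ me then (ms, max me p.2) :: rest else p :: (ms, me) :: rest

def get_highlight_positions (query : String) (text : String) : List (Int × Int) :=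
  if query.toList = [] ∨ text.toList = [] then []
  else
    match PySem.List.sorted2
        (pvPositions (text.toList.length + 2) (PySem.Chars.lower text.toList)
          (PySem.Chars.lower query.toList) (query.toList.length : Int))
        (fun p => p.1) (fun p => p.2) false with
    | [] => []
    | p0 :: rest => (rest.foldl pvMergeStep [p0]).reverse

-- ===== PORT B =====
-- for i in range(pos, pos + len(pat)): mask[i] = True
def pvMaskRange (mask : List Bool) (a b : Int) : List Bool :=
  (PySem.List.pyRange a b 1).foldl (fun m i => PySem.List.pySetD m i true) mask

-- the same find loop, but painting the coverage mask instead of collecting intervals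
def pvMaskAll : Nat → List Char → List Char → Int → List Bool → List Bool
  | 0, _, _, _, mask => mask
  | Nat.succ f, tl, pat, start, mask =>
    let pos := PySem.Chars.findFrom tl pat start none
    if pos = -1 then mask
    else pvMaskAll f tl pat (pos + 1) (pvMaskRange mask pos (pos + (pat.length : Int)))

-- for pat in [query_lower] + query_lower.split(): paint pat's matches
def pvMask (fuel : Nat) (tl ql : List Char) (n : Nat) : List Bool :=
  (ql :: PySem.Chars.split₀ ql).foldl
    (fun m pat => pvMaskAll fuel tl pat 0 m)
    (List.replicate n false)

-- one enumerate pass: open a run on False→True, close and emit it on True→False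
def pvScanStep (st : List (Int × Int) × Option Int) (c : Int × Bool) :
    List (Int × Int) × Option Int :=
  match st.2 with
  | none => if c.2 then (st.1, some c.1) else st
  | some r => if c.2 then st else (st.1 ++ [(r, c.1)], none)

-- final flush: if run_start is not None: result.append((run_start, len(text)))
def pvClose (st : List (Int × Int) × Option Int) (b : Int) : List (Int × Int) :=
  match st.2 with
  | none => st.1
  | some r => st.1 ++ [(r, b)]

def get_highlight_positions_alt (query : String) (text : String) : List (Int × Int) :=
  if query.toList = [] ∨ text.toList = [] then []
  else
    pvClose
      ((PySem.List.enumerate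
          (pvMask (text.toList.length + 2) (PySem.Chars.lower text.toList)
            (PySem.Chars.lower query.toList) text.toList.length) 0).foldl
        pvScanStep ([], none))
      (text.toList.length : Int)

-- ===== PRECONDITION & SPEC =====
def Spec_get_highlight_positions (query : String) (text : String) (out : List (Int × Int)) : Prop := out = get_highlight_positions_alt query text
instance (query : String) (text : String) (out : List (Int × Int)) : Decidable (Spec_get_highlight_positions query text out) := by unfold Spec_get_highlight_positions; infer_instance

-- ===== CLAIM (what is proved, stated in full; the proofs are below) =====
def Claim_equal_get_highlight_positions : Prop := ∀ (query : String) (text : String), Dom_get_highlight_positions query text → Spec_get_highlight_positions query text (get_highlight_positions query text)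

-- ===== LEMMAS AND PROOFS =====

theorem pvMaskAll_eq_foldl (fuel : Nat) :
    ∀ (tl pat : List Char) (start : Int) (m : List Bool),
    pvMaskAll fuel tl pat start m =
      (pvFindAll fuel tl pat start (pat.length : Int)).foldl
        (fun m p => pvMaskRange m p.1 p.2) m := by
  induction fuel with
  | zero => intro tl pat start m; rfl
  | succ f ih =>
    intro tl pat start m
    simp only [pvMaskAll, pvFindAll]
    by_cases h : PySem.Chars.findFrom tl pat start none = -1
    · simp [h]
    · simp [h, ih]

theorem pvSetFold_length (is : List Int) : ∀ (m : List Bool),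
    (is.foldl (fun m i => PySem.List.pySetD m i true) m).length = m.length := by
  induction is with
  | nil => intro m; rfl
  | cons i is ih => intro m; simp [ih, PySem.List.length_pySetD]

theorem pvMaskRange_length (a b : Int) (m : List Bool) :
    (pvMaskRange m a b).length = m.length := pvSetFold_length _ m

theorem pvMaskRange_get_aux (d : Nat) : ∀ (a b : Int), (b - a).toNat = d → 0 ≤ a →
    ∀ (m : List Bool) (k : Nat),
    (pvMaskRange m a b)[k]? = some true ↔
      (m[k]? = some true ∨ (a ≤ (k : Int) ∧ (k : Int) < b ∧ k < m.length)) := by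
  induction d with
  | zero =>
    intro a b hd ha m k
    have hba : b ≤ a := by omega
    unfold pvMaskRange
    rw [PySem.List.pyRange_one_eq_nil hba]
    simp only [List.foldl_nil]
    constructor
    · exact Or.inl
    · rintro (h | h); · exact h
      · omega
  | succ d ih =>
    intro a b hd ha m k
    have hab : a < b := by omega
    unfold pvMaskRange
    rw [PySem.List.pyRange_one_cons hab]
    simp only [List.foldl_cons]
    rw [PySem.List.pySetD_of_nonneg m true ha]
    have := ih (a + 1) b (by omega) (by omega) (m.set a.toNat true) k
    unfold pvMaskRange at this
    rw [this]
    rw [List.getElem?_set]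
    have hcast : ((a.toNat : Int)) = a := Int.toNat_of_nonneg ha
    simp only [List.length_set]
    by_cases hk : a.toNat = k
    · subst hk
      by_cases hlen : a.toNat < m.length
      · simp only [if_pos hlen]
        constructor
        · intro _; right; omega
        · intro _; left; simp
      · simp only [if_neg hlen]
        constructor
        · rintro (h | h)
          · exact absurd h (by simp)
          · omega
        · rintro (h | h)
          · rw [List.getElem?_eq_none (by omega)] at h; exact absurd h (by simp)
          · omega
    · simp only [if_neg hk]
      constructor
      · rintro (h | h)
        · exact Or.inl h
        · right; omega
      · rintro (h | h)
        · exact Or.inl h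
        · right; omega

theorem pvMaskRange_get (a b : Int) (ha : 0 ≤ a) (m : List Bool) (k : Nat) :
    (pvMaskRange m a b)[k]? = some true ↔
      (m[k]? = some true ∨ (a ≤ (k : Int) ∧ (k : Int) < b ∧ k < m.length)) :=
  pvMaskRange_get_aux (b - a).toNat a b rfl ha m k

theorem pvMaskFold_length (L : List (Int × Int)) : ∀ (m : List Bool),
    (L.foldl (fun m p => pvMaskRange m p.1 p.2) m).length = m.length := by
  induction L with
  | nil => intro m; rfl
  | cons p L ih => intro m; simp only [List.foldl_cons]; rw [ih, pvMaskRange_length]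

theorem pvMaskFold_get (L : List (Int × Int)) : ∀ (m : List Bool),
    (∀ p ∈ L, 0 ≤ p.1) → ∀ (k : Nat),
    (L.foldl (fun m p => pvMaskRange m p.1 p.2) m)[k]? = some true ↔
      (m[k]? = some true ∨ ∃ p ∈ L, p.1 ≤ (k : Int) ∧ (k : Int) < p.2 ∧ k < m.length) := by
  induction L with
  | nil => intro m _ k; simp
  | cons p L ih =>
    intro m hL k
    simp only [List.foldl_cons]
    rw [ih (pvMaskRange m p.1 p.2) (fun q hq => hL q (List.mem_cons_of_mem _ hq)) k]
    rw [pvMaskRange_get p.1 p.2 (hL p (List.mem_cons_self)) m k]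
    simp only [pvMaskRange_length, List.mem_cons]
    constructor
    · rintro ((h | h) | ⟨q, hq, h⟩)
      · exact Or.inl h
      · exact Or.inr ⟨p, Or.inl rfl, h⟩
      · exact Or.inr ⟨q, Or.inr hq, h⟩
    · rintro (h | ⟨q, (rfl | hq), h⟩)
      · exact Or.inl (Or.inl h)
      · exact Or.inl (Or.inr h)
      · exact Or.inr ⟨q, hq, h⟩

theorem pvFindAll_bounds (fuel : Nat) :
    ∀ (tl pat : List Char) (k : Nat) (plen : Int),
    pat ≠ [] → plen = (pat.length : Int) → k ≤ tl.length →
    ∀ p ∈ pvFindAll fuel tl pat (k : Int) plen,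
      0 ≤ p.1 ∧ p.1 < p.2 ∧ p.2 ≤ (tl.length : Int) := by
  induction fuel with
  | zero => intro tl pat k plen _ _ _ p hp; simp [pvFindAll] at hp
  | succ f ih =>
    intro tl pat k plen hpat hplen hk p hp
    simp only [pvFindAll] at hp
    by_cases hpos : PySem.Chars.findFrom tl pat (k : Int) none = -1
    · simp [hpos] at hp
    · rw [if_neg hpos] at hp
      obtain ⟨hle, hpre, -⟩ := PySem.Chars.findFrom_natCast_spec tl pat k hk hpos
      set pos := PySem.Chars.findFrom tl pat (k : Int) none with hposdef
      have hpos0 : 0 ≤ pos := le_trans (by exact_mod_cast Nat.zero_le k) hle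
      have hlen : pat.length ≤ tl.length - pos.toNat := by
        have := hpre.length_le
        simpa [List.length_drop] using this
      have hplen1 : 1 ≤ pat.length := by
        cases pat with
        | nil => exact absurd rfl hpat
        | cons c cs => simp
      have hposcast : ((pos.toNat : Int)) = pos := Int.toNat_of_nonneg hpos0
      rcases List.mem_cons.mp hp with rfl | hp'
      · refine ⟨hpos0, ?_, ?_⟩ <;> simp only [hplen] <;> omega
      · have hk' : pos.toNat + 1 ≤ tl.length := by omega
        have hcast1 : ((pos.toNat + 1 : Nat) : Int) = pos + 1 := by omega
        rw [← hcast1] at hp'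
        exact ih tl pat (pos.toNat + 1) plen hpat hplen hk' p hp'

theorem pvSplit₀_go_ne_nil (s : List Char) : ∀ (cur : List Char) (acc : List (List Char)),
    (∀ t ∈ acc, t ≠ []) → ∀ t ∈ PySem.Chars.split₀.go s cur acc, t ≠ [] := by
  induction s with
  | nil =>
    intro cur acc hacc t ht
    rw [PySem.Chars.split₀.go.eq_def] at ht
    by_cases hc : cur.isEmpty
    · simp only [if_pos hc] at ht
      exact hacc t (List.mem_reverse.mp ht)
    · simp only [if_neg hc] at ht
      rcases List.mem_cons.mp (List.mem_reverse.mp ht) with rfl | h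
      · simp only [List.isEmpty_iff] at hc
        simpa using hc
      · exact hacc t h
  | cons c rest ih =>
    intro cur acc hacc t ht
    rw [PySem.Chars.split₀.go.eq_def] at ht
    by_cases hs : PySem.Chars.isspace c
    · simp only [if_pos hs] at ht
      by_cases hc : cur.isEmpty
      · simp only [if_pos hc] at ht
        exact ih [] acc hacc t ht
      · simp only [if_neg hc] at ht
        refine ih [] (cur.reverse :: acc) ?_ t ht
        intro u hu
        rcases List.mem_cons.mp hu with rfl | hu'
        · simp [List.isEmpty_iff] at hc
          simpa using hc
        · exact hacc u hu'
    · simp only [if_neg hs] at ht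
      exact ih (c :: cur) acc hacc t ht

theorem pvSplit₀_ne_nil (s t : List Char) (h : t ∈ PySem.Chars.split₀ s) : t ≠ [] :=
  pvSplit₀_go_ne_nil s [] [] (by simp) t h

def pvLexBefore (a b : Int × Int) : Bool :=
  decide (a.1 < b.1) || (!decide (b.1 < a.1) && decide (a.2 < b.2))

def pvRlex (p q : Int × Int) : Prop := p.1 < q.1 ∨ (p.1 = q.1 ∧ p.2 ≤ q.2)

theorem pvSorted2_eq_foldl (xs : List (Int × Int)) :
    PySem.List.sorted2 xs (fun p => p.1) (fun p => p.2) false =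
      xs.foldl (fun acc x => PySem.List.insertBy pvLexBefore x acc) [] := rfl

theorem pvRlex_of_before_true {a b : Int × Int} (h : pvLexBefore a b = true) : pvRlex a b := by
  simp only [pvLexBefore, Bool.or_eq_true, Bool.and_eq_true, Bool.not_eq_eq_eq_not,
    Bool.not_true, decide_eq_true_eq, decide_eq_false_iff_not] at h
  unfold pvRlex; omega

theorem pvRlex_of_before_false {a b : Int × Int} (h : pvLexBefore a b = false) : pvRlex b a := by
  unfold pvLexBefore at h
  rw [Bool.or_eq_false_iff, Bool.and_eq_false_iff] at h
  obtain ⟨h1, h2⟩ := h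
  rw [decide_eq_false_iff_not] at h1
  unfold pvRlex
  rcases h2 with h2 | h2
  · rw [Bool.not_eq_false', decide_eq_true_eq] at h2; omega
  · rw [decide_eq_false_iff_not] at h2; omega

theorem pvRlex_trans {a b c : Int × Int} (h1 : pvRlex a b) (h2 : pvRlex b c) : pvRlex a c := by
  unfold pvRlex at *; omega

theorem pvInsertBy_pairwise (x : Int × Int) : ∀ (ys : List (Int × Int)),
    ys.Pairwise pvRlex → (PySem.List.insertBy pvLexBefore x ys).Pairwise pvRlex := by
  intro ys
  induction ys with
  | nil => intro _; simp [PySem.List.insertBy]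
  | cons y ys ih =>
    intro hp
    rw [List.pairwise_cons] at hp
    rw [PySem.List.insertBy]
    by_cases hb : pvLexBefore x y = true
    · rw [if_pos hb]
      rw [List.pairwise_cons]
      refine ⟨?_, List.pairwise_cons.mpr hp⟩
      intro z hz
      rcases List.mem_cons.mp hz with rfl | hz'
      · exact pvRlex_of_before_true hb
      · exact pvRlex_trans (pvRlex_of_before_true hb) (hp.1 z hz')
    · rw [if_neg hb]
      rw [List.pairwise_cons]
      refine ⟨?_, ih hp.2⟩
      intro z hz
      rcases (PySem.List.mem_insertBy pvLexBefore x z ys).mp hz with rfl | hz'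
      · exact pvRlex_of_before_false (Bool.eq_false_iff.mpr hb ▸ rfl)
      · exact hp.1 z hz'

theorem pvFoldlInsert_pairwise (xs : List (Int × Int)) : ∀ (acc : List (Int × Int)),
    acc.Pairwise pvRlex →
    (xs.foldl (fun acc x => PySem.List.insertBy pvLexBefore x acc) acc).Pairwise pvRlex := by
  induction xs with
  | nil => intro acc h; exact h
  | cons x xs ih =>
    intro acc h
    exact ih _ (pvInsertBy_pairwise x acc h)

theorem pvSorted2_pairwise_fst (xs : List (Int × Int)) :
    (PySem.List.sorted2 xs (fun p => p.1) (fun p => p.2) false).Pairwise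
      (fun p q => p.1 ≤ q.1) := by
  rw [pvSorted2_eq_foldl]
  refine List.Pairwise.imp ?_ (pvFoldlInsert_pairwise xs [] (by simp))
  intro a b h
  unfold pvRlex at h; omega



theorem pvFoldl_segments (f : List Char → List (Int × Int)) (pats : List (List Char)) :
    ∀ (m : List Bool),
    pats.foldl (fun m pat => (f pat).foldl (fun m p => pvMaskRange m p.1 p.2) m) m =
      (pats.flatMap f).foldl (fun m p => pvMaskRange m p.1 p.2) m := by
  induction pats with
  | nil => intro m; rfl
  | cons pat pats ih => intro m; simp [List.foldl_append, ih]

theorem pvMask_eq_foldl_positions (fuel : Nat) (tl ql : List Char) (n : Nat) :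
    pvMask fuel tl ql n =
      (pvPositions fuel tl ql (ql.length : Int)).foldl
        (fun m p => pvMaskRange m p.1 p.2) (List.replicate n false) := by
  unfold pvMask pvPositions
  have hfold : ∀ m : List Bool,
      (ql :: PySem.Chars.split₀ ql).foldl (fun m pat => pvMaskAll fuel tl pat 0 m) m =
      (ql :: PySem.Chars.split₀ ql).foldl
        (fun m pat => (pvFindAll fuel tl pat 0 (pat.length : Int)).foldl
          (fun m p => pvMaskRange m p.1 p.2) m) m := by
    intro m
    refine PySem.List.foldl_congr_mem _ _ _ _ ?_
    intro acc pat _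
    exact pvMaskAll_eq_foldl fuel tl pat 0 acc
  rw [hfold, pvFoldl_segments (fun pat => pvFindAll fuel tl pat 0 (pat.length : Int))]
  rw [PySem.List.foldl_append_eq_flatMap]
  simp [List.flatMap_cons]




-- coverage of a list of half-open intervals, and the canonical (sorted, gapped, nonempty) shape;
-- both ports' results are canonical and cover exactly the same cells, hence equal
def pvCov (L : List (Int × Int)) (j : Int) : Prop := ∃ p ∈ L, p.1 ≤ j ∧ j < p.2
def pvCanon (L : List (Int × Int)) : Prop :=
  L.IsChain (fun p q => p.2 < q.1) ∧ ∀ p ∈ L, p.1 < p.2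

theorem pvCov_nil (j : Int) : ¬ pvCov [] j := by simp [pvCov]
theorem pvCov_cons (s e : Int) (L : List (Int × Int)) (j : Int) :
    pvCov ((s, e) :: L) j ↔ (s ≤ j ∧ j < e) ∨ pvCov L j := by
  simp [pvCov]
theorem pvCov_append (L M : List (Int × Int)) (j : Int) :
    pvCov (L ++ M) j ↔ pvCov L j ∨ pvCov M j := by
  simp [pvCov, or_and_right, exists_or]
theorem pvCov_reverse (L : List (Int × Int)) (j : Int) :
    pvCov L.reverse j ↔ pvCov L j := by
  simp [pvCov]
theorem pvCov_of_mem_iff (L M : List (Int × Int)) (h : ∀ p, p ∈ L ↔ p ∈ M) (j : Int) :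
    pvCov L j ↔ pvCov M j := by
  simp only [pvCov, h]

theorem pvChain_append_singleton (res : List (Int × Int)) (x : Int × Int)
    (h : res.IsChain (fun p q => p.2 < q.1)) (hx : ∀ p ∈ res, p.2 < x.1) :
    (res ++ [x]).IsChain (fun p q => p.2 < q.1) := by
  rw [List.isChain_append]
  refine ⟨h, by simp, ?_⟩
  intro y hy z hz
  simp only [List.head?_cons, Option.mem_def, Option.some.injEq] at hz
  subst hz
  exact hx y (List.mem_of_mem_getLast? hy)

theorem pvCanon_tail_gt (s e : Int) (L : List (Int × Int)) :
    ((s, e) :: L).IsChain (fun p q => p.2 < q.1) →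
    (∀ p ∈ (s, e) :: L, p.1 < p.2) →
    ∀ p ∈ L, e < p.1 := by
  induction L generalizing s e with
  | nil => intro _ _ p hp; simp at hp
  | cons q L ih =>
    obtain ⟨s2, e2⟩ := q
    intro hc hne p hp
    rw [List.isChain_cons_cons] at hc
    have h1 : e < s2 := hc.1
    rcases List.mem_cons.mp hp with rfl | hp'
    · exact h1
    · have h2 : s2 < e2 := hne (s2, e2) (by simp)
      have := ih s2 e2 hc.2 (fun p hp => hne p (List.mem_cons_of_mem _ hp)) p hp'
      omega

theorem pvCov_head_lb (s e : Int) (L : List (Int × Int))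
    (hc : ((s, e) :: L).IsChain (fun p q => p.2 < q.1))
    (hne : ∀ p ∈ (s, e) :: L, p.1 < p.2)
    (j : Int) (h : pvCov ((s, e) :: L) j) : s ≤ j := by
  rcases (pvCov_cons s e L j).mp h with h' | h'
  · exact h'.1
  · obtain ⟨p, hp, hle, _⟩ := h'
    have := pvCanon_tail_gt s e L hc hne p hp
    have hse := hne (s, e) (by simp)
    simp at hse
    omega

theorem pvCov_end_not (s e : Int) (L : List (Int × Int))
    (hc : ((s, e) :: L).IsChain (fun p q => p.2 < q.1))
    (hne : ∀ p ∈ (s, e) :: L, p.1 < p.2) : ¬ pvCov ((s, e) :: L) e := by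
  intro h
  rcases (pvCov_cons s e L e).mp h with h' | h'
  · omega
  · obtain ⟨p, hp, hle, _⟩ := h'
    have := pvCanon_tail_gt s e L hc hne p hp
    omega

theorem pvCov_tail_iff (s e : Int) (L : List (Int × Int))
    (hc : ((s, e) :: L).IsChain (fun p q => p.2 < q.1))
    (hne : ∀ p ∈ (s, e) :: L, p.1 < p.2) (j : Int) :
    pvCov L j ↔ (pvCov ((s, e) :: L) j ∧ e < j) := by
  constructor
  · rintro ⟨p, hp, hle, hlt⟩
    have := pvCanon_tail_gt s e L hc hne p hp
    exact ⟨⟨p, List.mem_cons_of_mem _ hp, hle, hlt⟩, by omega⟩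
  · rintro ⟨h, hej⟩
    rcases (pvCov_cons s e L j).mp h with h' | h'
    · omega
    · exact h'

theorem pvCanon_unique (L : List (Int × Int)) : ∀ (M : List (Int × Int)),
    pvCanon L → pvCanon M → (∀ j, pvCov L j ↔ pvCov M j) → L = M := by
  induction L with
  | nil =>
    intro M _ hM h
    cases M with
    | nil => rfl
    | cons q M' =>
      obtain ⟨s', e'⟩ := q
      have hse : s' < e' := hM.2 (s', e') (by simp)
      have : pvCov ((s', e') :: M') s' := (pvCov_cons _ _ _ _).mpr (Or.inl ⟨le_refl _, hse⟩)
      exact absurd ((h s').mpr this) (pvCov_nil s')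
  | cons p L' ih =>
    obtain ⟨s, e⟩ := p
    intro M hL hM h
    have hse : s < e := hL.2 (s, e) (by simp)
    cases M with
    | nil =>
      have : pvCov ((s, e) :: L') s := (pvCov_cons _ _ _ _).mpr (Or.inl ⟨le_refl _, hse⟩)
      exact absurd ((h s).mp this) (pvCov_nil s)
    | cons q M' =>
      obtain ⟨s', e'⟩ := q
      have hse' : s' < e' := hM.2 (s', e') (by simp)
      have hcovLs : pvCov ((s, e) :: L') s := (pvCov_cons _ _ _ _).mpr (Or.inl ⟨le_refl _, hse⟩)
      have hcovMs' : pvCov ((s', e') :: M') s' := (pvCov_cons _ _ _ _).mpr (Or.inl ⟨le_refl _, hse'⟩)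
      have hss : s = s' := by
        have h1 := pvCov_head_lb s' e' M' hM.1 hM.2 s ((h s).mp hcovLs)
        have h2 := pvCov_head_lb s e L' hL.1 hL.2 s' ((h s').mpr hcovMs')
        omega
      subst hss
      have hee : e = e' := by
        by_contra hne
        rcases lt_or_gt_of_ne hne with hlt | hgt
        · have : pvCov ((s, e') :: M') e := (pvCov_cons _ _ _ _).mpr (Or.inl ⟨by omega, hlt⟩)
          exact pvCov_end_not s e L' hL.1 hL.2 ((h e).mpr this)
        · have : pvCov ((s, e) :: L') e' := (pvCov_cons _ _ _ _).mpr (Or.inl ⟨by omega, hgt⟩)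
          exact pvCov_end_not s e' M' hM.1 hM.2 ((h e').mp this)
      subst hee
      have hLtail : pvCanon L' :=
        ⟨hL.1.of_cons, fun p hp => hL.2 p (List.mem_cons_of_mem _ hp)⟩
      have hMtail : pvCanon M' :=
        ⟨hM.1.of_cons, fun p hp => hM.2 p (List.mem_cons_of_mem _ hp)⟩
      have htails : ∀ j, pvCov L' j ↔ pvCov M' j := by
        intro j
        rw [pvCov_tail_iff s e L' hL.1 hL.2 j, pvCov_tail_iff s e M' hM.1 hM.2 j, h j]
      rw [ih M' hLtail hMtail htails]

theorem pvMerge_inv (rest : List (Int × Int)) :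
    ∀ (cs ce : Int) (racc : List (Int × Int)),
    cs < ce → (∀ p ∈ racc, p.1 < p.2) →
    (((cs, ce) :: racc).IsChain (fun p q => q.2 < p.1)) →
    rest.Pairwise (fun p q => p.1 ≤ q.1) →
    (∀ p ∈ rest, p.1 < p.2) → (∀ p ∈ rest, cs ≤ p.1) →
    ∃ cs' ce' racc',
      rest.foldl pvMergeStep ((cs, ce) :: racc) = (cs', ce') :: racc' ∧
      cs' < ce' ∧ (∀ p ∈ racc', p.1 < p.2) ∧
      (((cs', ce') :: racc').IsChain (fun p q => q.2 < p.1)) ∧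
      (∀ j, pvCov ((cs', ce') :: racc') j ↔ pvCov ((cs, ce) :: racc) j ∨ pvCov rest j) := by
  induction rest with
  | nil =>
    intro cs ce racc h1 h2 h3 _ _ _
    exact ⟨cs, ce, racc, rfl, h1, h2, h3, fun j => by simp [pvCov_nil]⟩
  | cons p rest ih =>
    obtain ⟨s, e⟩ := p
    intro cs ce racc h1 h2 h3 hpw hne hstart
    have hcs_s : cs ≤ s := hstart (s, e) (by simp)
    have hs_e : s < e := hne (s, e) (by simp)
    rw [List.pairwise_cons] at hpw
    simp only [List.foldl_cons]
    by_cases hse : s ≤ ce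
    · have hstep : pvMergeStep ((cs, ce) :: racc) (s, e) = (cs, max ce e) :: racc := by
        simp [pvMergeStep, hse]
      rw [hstep]
      have h3' : ((cs, max ce e) :: racc).IsChain (fun p q => q.2 < p.1) := by
        rw [List.isChain_cons] at h3 ⊢
        exact h3
      obtain ⟨cs', ce', racc', heq, ha, hb, hcc, hcov⟩ :=
        ih cs (max ce e) racc (by omega) h2 h3' hpw.2
          (fun q hq => hne q (List.mem_cons_of_mem _ hq))
          (fun q hq => hstart q (List.mem_cons_of_mem _ hq))
      refine ⟨cs', ce', racc', heq, ha, hb, hcc, ?_⟩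
      intro j
      rw [hcov j, pvCov_cons cs (max ce e) racc j, pvCov_cons cs ce racc j,
        pvCov_cons s e rest j]
      rw [lt_max_iff]
      constructor
      · rintro ((⟨hj1, hj2⟩ | h) | h)
        · by_cases hj : j < ce
          · exact Or.inl (Or.inl ⟨hj1, hj⟩)
          · rcases hj2 with hj2 | hj2
            · omega
            · exact Or.inr (Or.inl ⟨by omega, hj2⟩)
        · exact Or.inl (Or.inr h)
        · exact Or.inr (Or.inr h)
      · rintro ((⟨hj1, hj2⟩ | h) | (⟨hj1, hj2⟩ | h))
        · exact Or.inl (Or.inl ⟨hj1, Or.inl hj2⟩)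
        · exact Or.inl (Or.inr h)
        · exact Or.inl (Or.inl ⟨by omega, Or.inr hj2⟩)
        · exact Or.inr h
    · have hstep : pvMergeStep ((cs, ce) :: racc) (s, e) = (s, e) :: (cs, ce) :: racc := by
        simp [pvMergeStep, hse]
      rw [hstep]
      have h2' : ∀ p ∈ (cs, ce) :: racc, p.1 < p.2 := by
        intro p hp
        rcases List.mem_cons.mp hp with rfl | hp'
        · exact h1
        · exact h2 p hp'
      have h3' : ((s, e) :: (cs, ce) :: racc).IsChain (fun p q => q.2 < p.1) := by
        rw [List.isChain_cons_cons]
        exact ⟨by omega, h3⟩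
      obtain ⟨cs', ce', racc', heq, ha, hb, hcc, hcov⟩ :=
        ih s e ((cs, ce) :: racc) hs_e h2' h3' hpw.2
          (fun q hq => hne q (List.mem_cons_of_mem _ hq)) hpw.1
      refine ⟨cs', ce', racc', heq, ha, hb, hcc, ?_⟩
      intro j
      rw [hcov j, pvCov_cons s e ((cs, ce) :: racc) j, pvCov_cons s e rest j]
      tauto

theorem pvExists_mask_cons (c : Bool) (cs : List Bool) (s j : Int) :
    (∃ k : Nat, ((c :: cs)[k]? = some true) ∧ j = s + k) ↔
      ((c = true ∧ j = s) ∨ ∃ k : Nat, cs[k]? = some true ∧ j = (s + 1) + k) := by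
  constructor
  · rintro ⟨k, hk, rfl⟩
    cases k with
    | zero => simp only [List.getElem?_cons_zero, Option.some.injEq] at hk; exact Or.inl ⟨hk, by simp⟩
    | succ k => exact Or.inr ⟨k, by simpa using hk, by push_cast; ring⟩
  · rintro (⟨rfl, rfl⟩ | ⟨k, hk, rfl⟩)
    · exact ⟨0, by simp⟩
    · exact ⟨k + 1, by simpa using hk, by push_cast; ring⟩

theorem pvScan_inv (mask : List Bool) :
    ∀ (s : Int) (res : List (Int × Int)) (o : Option Int),
    res.IsChain (fun p q => p.2 < q.1) → (∀ p ∈ res, p.1 < p.2) →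
    (match o with
      | none => ∀ p ∈ res, p.2 < s
      | some r => r < s ∧ ∀ p ∈ res, p.2 < r) →
    pvCanon (pvClose ((PySem.List.enumerate mask s).foldl pvScanStep (res, o)) (s + mask.length)) ∧
    ∀ j, pvCov (pvClose ((PySem.List.enumerate mask s).foldl pvScanStep (res, o)) (s + mask.length)) j ↔
      pvCov (pvClose (res, o) s) j ∨ ∃ k : Nat, mask[k]? = some true ∧ j = s + k := by
  induction mask with
  | nil =>
    intro s res o hchain hne ho
    simp only [PySem.List.enumerate_nil, List.foldl_nil, List.length_nil, Nat.cast_zero, add_zero]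
    constructor
    · cases o with
      | none => exact ⟨hchain, hne⟩
      | some r =>
        refine ⟨pvChain_append_singleton res (r, s) hchain ho.2, ?_⟩
        intro p hp
        rcases List.mem_append.mp hp with hp' | hp'
        · exact hne p hp'
        · simp at hp'; subst hp'; exact ho.1
    · intro j
      simp
  | cons c cs ih =>
    intro s res o hchain hne ho
    rw [PySem.List.enumerate_cons]
    simp only [List.foldl_cons]
    have hlen : s + ((c :: cs).length : Int) = (s + 1) + (cs.length : Int) := by
      simp only [List.length_cons]; push_cast; ring
    rw [hlen]
    cases o with
    | none =>
      cases hc : c with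
      | true =>
        have hstep : pvScanStep (res, none) (s, true) = (res, some s) := by
          simp [pvScanStep]
        rw [hstep]
        obtain ⟨hcanon, hcov⟩ := ih (s + 1) res (some s) hchain hne ⟨by omega, ho⟩
        refine ⟨hcanon, ?_⟩
        intro j
        rw [hcov j, pvExists_mask_cons true cs s j]
        have hbase : pvCov (pvClose (res, some s) (s + 1)) j ↔
            pvCov (pvClose (res, none) s) j ∨ j = s := by
          simp only [pvClose, pvCov_append]
          constructor
          · rintro (h | h)
            · exact Or.inl h
            · right
              simp [pvCov] at h
              omega
          · rintro (h | rfl)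
            · exact Or.inl h
            · right
              simp [pvCov]
        rw [hbase]
        tauto
      | false =>
        have hstep : pvScanStep (res, none) (s, false) = (res, none) := by
          simp [pvScanStep]
        rw [hstep]
        obtain ⟨hcanon, hcov⟩ := ih (s + 1) res none hchain hne
          (fun p hp => by have := ho p hp; omega)
        refine ⟨hcanon, ?_⟩
        intro j
        rw [hcov j, pvExists_mask_cons false cs s j]
        simp only [pvClose, Bool.false_eq_true, false_and, false_or]
    | some r =>
      cases hc : c with
      | true =>
        have hstep : pvScanStep (res, some r) (s, true) = (res, some r) := by
          simp [pvScanStep]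
        rw [hstep]
        obtain ⟨hcanon, hcov⟩ := ih (s + 1) res (some r) hchain hne ⟨by omega, ho.2⟩
        refine ⟨hcanon, ?_⟩
        intro j
        rw [hcov j, pvExists_mask_cons true cs s j]
        have hbase : pvCov (pvClose (res, some r) (s + 1)) j ↔
            pvCov (pvClose (res, some r) s) j ∨ j = s := by
          simp only [pvClose, pvCov_append]
          have hr : r ≤ s := by omega
          constructor
          · rintro (h | h)
            · exact Or.inl (Or.inl h)
            · simp [pvCov] at h
              by_cases hj : j = s
              · exact Or.inr hj
              · refine Or.inl (Or.inr ?_)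
                simp [pvCov]
                omega
          · rintro ((h | h) | rfl)
            · exact Or.inl h
            · right
              simp [pvCov] at h ⊢
              omega
            · right
              simp [pvCov]
              omega
        rw [hbase]
        tauto
      | false =>
        have hstep : pvScanStep (res, some r) (s, false) = (res ++ [(r, s)], none) := by
          simp [pvScanStep]
        rw [hstep]
        have hchain' : (res ++ [(r, s)]).IsChain (fun p q => p.2 < q.1) :=
          pvChain_append_singleton res (r, s) hchain ho.2
        have hne' : ∀ p ∈ res ++ [(r, s)], p.1 < p.2 := by
          intro p hp
          rcases List.mem_append.mp hp with hp' | hp'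
          · exact hne p hp'
          · simp at hp'; subst hp'; exact ho.1
        have hend : ∀ p ∈ res ++ [(r, s)], p.2 < s + 1 := by
          intro p hp
          rcases List.mem_append.mp hp with hp' | hp'
          · have := ho.2 p hp'; omega
          · simp at hp'; subst hp'; simp
        obtain ⟨hcanon, hcov⟩ := ih (s + 1) (res ++ [(r, s)]) none hchain' hne' hend
        refine ⟨hcanon, ?_⟩
        intro j
        rw [hcov j, pvExists_mask_cons false cs s j]
        simp only [pvClose, Bool.false_eq_true, false_and, false_or]

theorem pvMain (query text : String) :
    get_highlight_positions query text = get_highlight_positions_alt query text := by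
  unfold get_highlight_positions get_highlight_positions_alt
  by_cases h : query.toList = [] ∨ text.toList = []
  · rw [if_pos h, if_pos h]
  · rw [if_neg h, if_neg h]
    rw [not_or] at h
    obtain ⟨hq, ht⟩ := h
    set n := text.toList.length with hn
    set tl := PySem.Chars.lower text.toList with htl
    set ql := PySem.Chars.lower query.toList with hql
    set fuel := n + 2 with hfuel
    have hql_len : ql.length = query.toList.length := by
      rw [hql]; simp [PySem.Chars.lower]
    have htl_len : tl.length = n := by
      rw [htl, hn]; simp [PySem.Chars.lower]
    have hql_ne : ql ≠ [] := by
      rw [hql]; simpa [PySem.Chars.lower] using hq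
    set P := pvPositions fuel tl ql (query.toList.length : Int) with hP
    -- interval bounds
    have hbP : ∀ p ∈ P, 0 ≤ p.1 ∧ p.1 < p.2 ∧ p.2 ≤ (n : Int) := by
      intro p hp
      rw [hP] at hp
      unfold pvPositions at hp
      rw [PySem.List.foldl_append_eq_flatMap] at hp
      rw [← htl_len]
      rcases List.mem_append.mp hp with hp' | hp'
      · rw [← hql_len] at hp'
        exact pvFindAll_bounds fuel tl ql 0 (ql.length : Int) hql_ne rfl (Nat.zero_le _)
          p (by exact_mod_cast hp')
      · obtain ⟨tok, htok, hptok⟩ := List.mem_flatMap.mp hp'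
        exact pvFindAll_bounds fuel tl tok 0 (tok.length : Int)
          (pvSplit₀_ne_nil ql tok htok) rfl (Nat.zero_le _) p (by exact_mod_cast hptok)
    -- mask semantics
    set mask := pvMask fuel tl ql n with hmask
    have hmask_eq : mask = P.foldl (fun m p => pvMaskRange m p.1 p.2) (List.replicate n false) := by
      rw [hmask, pvMask_eq_foldl_positions, hP, ← hql_len]
    have hmask_len : mask.length = n := by
      rw [hmask_eq, pvMaskFold_length, List.length_replicate]
    have hmask_get : ∀ k : Nat, mask[k]? = some true ↔ pvCov P (k : Int) := by
      intro k
      rw [hmask_eq, pvMaskFold_get P _ (fun p hp => (hbP p hp).1) k]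
      simp only [List.length_replicate]
      constructor
      · rintro (hfalse | ⟨p, hp, h1, h2, _⟩)
        · rcases Nat.lt_or_ge k n with hk | hk
          · rw [List.getElem?_replicate_of_lt hk] at hfalse; simp at hfalse
          · rw [List.getElem?_eq_none (by simpa using hk)] at hfalse; simp at hfalse
        · exact ⟨p, hp, h1, h2⟩
      · rintro ⟨p, hp, h1, h2⟩
        have := hbP p hp
        exact Or.inr ⟨p, hp, h1, h2, by omega⟩
    have hkey : ∀ j : Int, pvCov P j ↔ ∃ k : Nat, mask[k]? = some true ∧ j = (0 : Int) + k := by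
      intro j
      constructor
      · intro hc
        obtain ⟨p, hp, h1, h2⟩ := hc
        have hb := hbP p hp
        have hj0 : 0 ≤ j := by omega
        refine ⟨j.toNat, ?_, by omega⟩
        rw [hmask_get]
        rw [Int.toNat_of_nonneg hj0]
        exact ⟨p, hp, h1, h2⟩
      · rintro ⟨k, hk, rfl⟩
        rw [hmask_get] at hk
        simpa using hk
    -- B side: canonical and covering exactly P
    obtain ⟨hBcanon, hBcov⟩ := pvScan_inv mask 0 [] none (by simp) (by simp) (by simp)
    rw [hmask_len] at hBcanon hBcov
    have hzn : ((0 : Int) + (n : Int)) = (n : Int) := by ring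
    rw [hzn] at hBcanon hBcov
    have hBcov' : ∀ j,
        pvCov (pvClose ((PySem.List.enumerate mask 0).foldl pvScanStep ([], none)) (n : Int)) j ↔
          pvCov P j := by
      intro j
      rw [hBcov j, hkey j]
      simp [pvClose, pvCov]
    -- A side
    have hperm := PySem.List.sorted2_perm P (fun p : Int × Int => p.1) (fun p => p.2) false
    have hpw := pvSorted2_pairwise_fst P
    cases hS : PySem.List.sorted2 P (fun p : Int × Int => p.1) (fun p => p.2) false with
    | nil =>
      rw [hS] at hperm
      have hPnil : P = [] := hperm.symm.eq_nil
      refine (pvCanon_unique _ [] ⟨hBcanon.1, hBcanon.2⟩ ⟨by simp, by simp⟩ ?_).symm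
      intro j
      rw [hBcov' j, hPnil]
    | cons p0 rest =>
      rw [hS] at hperm hpw
      obtain ⟨s0, e0⟩ := p0
      change (rest.foldl pvMergeStep [(s0, e0)]).reverse = _
      have hmem : ∀ p, p ∈ (s0, e0) :: rest ↔ p ∈ P := fun p => hperm.mem_iff
      have hbS : ∀ p ∈ (s0, e0) :: rest, 0 ≤ p.1 ∧ p.1 < p.2 ∧ p.2 ≤ (n : Int) :=
        fun p hp => hbP p ((hmem p).mp hp)
      rw [List.pairwise_cons] at hpw
      obtain ⟨cs', ce', racc', heq, ha', hb', hcc', hcov'⟩ :=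
        pvMerge_inv rest s0 e0 []
          (hbS (s0, e0) (by simp)).2.1
          (by simp)
          (by simp)
          hpw.2
          (fun p hp => (hbS p (List.mem_cons_of_mem _ hp)).2.1)
          (fun p hp => hpw.1 p hp)
      rw [heq]
      have hAcanon : pvCanon (((cs', ce') :: racc').reverse) := by
        constructor
        · rw [List.isChain_reverse]
          exact hcc'
        · intro p hp
          rw [List.mem_reverse] at hp
          rcases List.mem_cons.mp hp with rfl | hp'
          · exact ha'
          · exact hb' p hp'
      have hAcov : ∀ j, pvCov (((cs', ce') :: racc').reverse) j ↔ pvCov P j := by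
        intro j
        rw [pvCov_reverse, hcov' j]
        have hiff : pvCov P j ↔ pvCov ((s0, e0) :: rest) j :=
          pvCov_of_mem_iff _ _ (fun p => (hmem p).symm) j
        rw [hiff, pvCov_cons]
        simp [pvCov]
      exact pvCanon_unique _ _ hAcanon ⟨hBcanon.1, hBcanon.2⟩
        (fun j => by rw [hAcov j, hBcov' j])

-- ===== VERDICT (by name: the statement is the Claim_ definition above) =====
theorem get_highlight_positions_spec : Claim_equal_get_highlight_positions := by
  intro query text _
  unfold Spec_get_highlight_positions
  exact pvMain query text
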